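-- pv_equiv track=rewrite | github.com/Tugas-Akhir-OpenStack-GPU-Benchmark/skripsi-openstack-benchmark-ansible | tasks/benchmark/scripts/nvidia-smi-track.py | get_process_to_utilization_mapping
-- ===== SOURCE A (Python) =====
-- def get_process_to_utilization_mapping(nvidia_smi_result: dict):
--     process_to_utilization_mapping = {}
--     for gpu_id, (gpu_util, memory_util, process_list) in nvidia_smi_result.items():
--         for process in process_list:
--             if process not in process_to_utilization_mapping:
--                 process_to_utilization_mapping[process] = [0, 0]
--             utilization = process_to_utilization_mapping[process]
--             utilization[0] = max(utilization[0], gpu_util)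
--             utilization[1] = max(utilization[1], memory_util)
--     return process_to_utilization_mapping
-- ===== SOURCE B (Python) =====
-- def get_process_to_utilization_mapping(nvidia_smi_result: dict):
--     # collect-then-reduce: first gather every (gpu_util, memory_util) sample per
--     # process, then take the per-component max seeded with 0 (matching the [0, 0] floor).
--     samples = {}
--     for gpu_util, memory_util, process_list in nvidia_smi_result.values():
--         for process in process_list:
--             samples.setdefault(process, []).append((gpu_util, memory_util))
--     return {process: [max([0] + [g for g, _ in pairs]),
--                       max([0] + [m for _, m in pairs])]
--             for process, pairs in samples.items()}
-- ===== Notes on version B (the rewrite author's own statement) =====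
-- stated objective: alternative
-- what changed: A maintains a running per-process [max_gpu, max_mem] pair that it mutates in place during the scan; B instead collects every (gpu_util, memory_util) sample into a dict-of-lists in one pass and then reduces each list with a 0-seeded max in a second pass.
import Mathlib
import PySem

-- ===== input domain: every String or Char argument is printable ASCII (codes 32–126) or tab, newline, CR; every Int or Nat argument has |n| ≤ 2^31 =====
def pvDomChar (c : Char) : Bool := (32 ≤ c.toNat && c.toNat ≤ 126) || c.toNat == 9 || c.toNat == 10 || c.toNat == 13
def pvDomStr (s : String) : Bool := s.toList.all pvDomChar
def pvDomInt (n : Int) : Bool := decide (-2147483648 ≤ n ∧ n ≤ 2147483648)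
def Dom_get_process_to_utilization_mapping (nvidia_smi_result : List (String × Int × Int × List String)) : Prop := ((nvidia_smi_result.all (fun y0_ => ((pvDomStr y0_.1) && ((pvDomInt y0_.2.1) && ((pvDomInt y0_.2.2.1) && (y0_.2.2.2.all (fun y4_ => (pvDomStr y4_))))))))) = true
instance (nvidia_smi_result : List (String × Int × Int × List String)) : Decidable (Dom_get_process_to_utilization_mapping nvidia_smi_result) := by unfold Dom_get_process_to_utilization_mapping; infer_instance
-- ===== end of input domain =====

-- B replaces A's in-place running-max pair per process with a collect-then-reduce
-- pass (gather all (gpu,mem) samples per process, then 0-seeded maxima); alternative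
-- decomposition, same cost; equivalence is about the return value only.


-- ===== PORT A =====
def get_process_to_utilization_mapping (nvidia_smi_result : List (String × Int × Int × List String)) : List (String × List Int) :=
  (nvidia_smi_result.foldl
    (fun m gpu =>
      let gpu_util := gpu.2.1
      let memory_util := gpu.2.2.1
      gpu.2.2.2.foldl
        (fun m process =>
          let m := if m.contains process then m else m.insert process [0, 0]
          let utilization := (m.get? process).getD []   -- m[process]; key present, default never used
          m.insert process
            [max ((PySem.List.pyGet? utilization 0).getD 0) gpu_util,
             max ((PySem.List.pyGet? utilization 1).getD 0) memory_util])  -- utilization is always a 2-list; defaults never used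
        m)
    PySem.Dict.empty).items

-- ===== PORT B =====
def get_process_to_utilization_mapping_alt (nvidia_smi_result : List (String × Int × Int × List String)) : List (String × List Int) :=
  let samples := nvidia_smi_result.foldl
    (fun d gpu =>
      gpu.2.2.2.foldl
        (fun d process => d.modify process [] (fun l => l ++ [(gpu.2.1, gpu.2.2.1)]))  -- setdefault(p, []).append(..)
        d)
    PySem.Dict.empty
  samples.items.map (fun pr =>
    (pr.1, [(PySem.List.max? ((0 : Int) :: pr.2.map (fun s => s.1)) (fun y => y)).getD 0,
            (PySem.List.max? ((0 : Int) :: pr.2.map (fun s => s.2)) (fun y => y)).getD 0]))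

-- ===== PRECONDITION & SPEC =====
-- Pre_ excludes lists with duplicate gpu ids: such a list does not represent a Python dict
-- (the dict collapses duplicate keys to the last entry before A ever sees them).
def Pre_get_process_to_utilization_mapping (nvidia_smi_result : List (String × Int × Int × List String)) : Prop :=
  (nvidia_smi_result.map (fun x => x.1)).Nodup
instance (nvidia_smi_result : List (String × Int × Int × List String)) : Decidable (Pre_get_process_to_utilization_mapping nvidia_smi_result) := by unfold Pre_get_process_to_utilization_mapping; infer_instance
def pvWitness_get_process_to_utilization_mapping : (List (String × Int × Int × List String)) :=
  [("gpu0", 10, 20, ["p1", "p2"]), ("gpu1", 5, 30, ["p1"])]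
def Spec_get_process_to_utilization_mapping (nvidia_smi_result : List (String × Int × Int × List String)) (out : List (String × List Int)) : Prop := out = get_process_to_utilization_mapping_alt nvidia_smi_result
instance (nvidia_smi_result : List (String × Int × Int × List String)) (out : List (String × List Int)) : Decidable (Spec_get_process_to_utilization_mapping nvidia_smi_result out) := by unfold Spec_get_process_to_utilization_mapping; infer_instance

-- ===== CLAIM (what is proved, stated in full; the proofs are below) =====
def Claim_equal_get_process_to_utilization_mapping : Prop := ∀ (nvidia_smi_result : List (String × Int × Int × List String)), Dom_get_process_to_utilization_mapping nvidia_smi_result → Pre_get_process_to_utilization_mapping nvidia_smi_result → Spec_get_process_to_utilization_mapping nvidia_smi_result (get_process_to_utilization_mapping nvidia_smi_result)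

-- ===== LEMMAS AND PROOFS =====

-- the flattened stream of (process, gpu_util, memory_util) events both loops traverse
def pvEvents (xs : List (String × Int × Int × List String)) : List (String × Int × Int) :=
  xs.flatMap (fun g => g.2.2.2.map (fun p => (p, g.2.1, g.2.2.1)))

-- A's per-event step
def pvAstep (m : PySem.Dict String (List Int)) (e : String × Int × Int) : PySem.Dict String (List Int) :=
  let m := if m.contains e.1 then m else m.insert e.1 [0, 0]
  let u := (m.get? e.1).getD []
  m.insert e.1 [max ((PySem.List.pyGet? u 0).getD 0) e.2.1, max ((PySem.List.pyGet? u 1).getD 0) e.2.2]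

-- B's per-event step
def pvBstep (d : PySem.Dict String (List (Int × Int))) (e : String × Int × Int) : PySem.Dict String (List (Int × Int)) :=
  d.modify e.1 [] (fun l => l ++ [e.2])

lemma pvA_events (xs : List (String × Int × Int × List String)) (m : PySem.Dict String (List Int)) :
    xs.foldl (fun m gpu =>
      let gpu_util := gpu.2.1
      let memory_util := gpu.2.2.1
      gpu.2.2.2.foldl (fun m process =>
        let m := if m.contains process then m else m.insert process [0, 0]
        let utilization := (m.get? process).getD []
        m.insert process
          [max ((PySem.List.pyGet? utilization 0).getD 0) gpu_util,
           max ((PySem.List.pyGet? utilization 1).getD 0) memory_util]) m) m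
    = (pvEvents xs).foldl pvAstep m := by
  induction xs generalizing m with
  | nil => rfl
  | cons g t ih =>
    rw [List.foldl_cons, pvEvents, List.flatMap_cons, List.foldl_append, ih, List.foldl_map]
    rfl

lemma pvB_events (xs : List (String × Int × Int × List String)) (d : PySem.Dict String (List (Int × Int))) :
    xs.foldl (fun d gpu =>
      gpu.2.2.2.foldl (fun d process => d.modify process [] (fun l => l ++ [(gpu.2.1, gpu.2.2.1)])) d) d
    = (pvEvents xs).foldl pvBstep d := by
  induction xs generalizing d with
  | nil => rfl
  | cons g t ih =>
    rw [List.foldl_cons, pvEvents, List.flatMap_cons, List.foldl_append, ih, List.foldl_map]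
    rfl

-- A's step is a single overwrite keyed on the running maxima stored at e.1 (default [0,0])
lemma pvAstep_insert (m : PySem.Dict String (List Int)) (e : String × Int × Int) :
    pvAstep m e = m.insert e.1
      [max ((PySem.List.pyGet? (m.getD e.1 [0, 0]) 0).getD 0) e.2.1,
       max ((PySem.List.pyGet? (m.getD e.1 [0, 0]) 1).getD 0) e.2.2] := by
  unfold pvAstep
  dsimp only
  cases hc : m.contains e.1 with
  | false =>
    rw [if_neg (by simp), PySem.Dict.get?_insert_self, PySem.Dict.insert_insert_self,
        PySem.Dict.getD_of_not_contains m _ hc]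
    rfl
  | true =>
    rw [if_pos rfl]
    rcases hg : m.get? e.1 with _ | v
    · rw [PySem.Dict.contains_eq_isSome_get?, hg] at hc; simp at hc
    · rw [PySem.Dict.getD_of_get?_eq_some m _ hg]
      rfl

-- running-max invariant for A's fold
lemma pvA_getD (l : List (String × Int × Int)) (k : String) :
    ∀ (m : PySem.Dict String (List Int)) (x y : Int), m.getD k [0, 0] = [x, y] →
    (l.foldl pvAstep m).getD k [0, 0]
      = [((l.filter (fun e => e.1 == k)).map (fun e => e.2.1)).foldl max x,
         ((l.filter (fun e => e.1 == k)).map (fun e => e.2.2)).foldl max y] := by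
  induction l with
  | nil => intro m x y h; simpa using h
  | cons e t ih =>
    intro m x y h
    rw [List.foldl_cons, pvAstep_insert]
    by_cases hk : e.1 = k
    · subst hk
      rw [ih _ (max x e.2.1) (max y e.2.2)
            (by rw [PySem.Dict.getD_insert_self, h]; simp [PySem.List.pyGet?, PySem.List.pyIdx?])]
      simp
    · rw [ih _ x y (by rw [PySem.Dict.getD_insert_of_ne m _ _ (fun hc => hk hc.symm)]; exact h)]
      simp [hk]

-- A's step in explicit insert form, as a function
lemma pvAstep_funext : pvAstep = fun (m : PySem.Dict String (List Int)) (e : String × Int × Int) =>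
    m.insert e.1
      [max ((PySem.List.pyGet? (m.getD e.1 [0, 0]) 0).getD 0) e.2.1,
       max ((PySem.List.pyGet? (m.getD e.1 [0, 0]) 1).getD 0) e.2.2] :=
  funext fun m => funext fun e => pvAstep_insert m e

theorem pv_items (l : List (String × Int × Int)) :
    (l.foldl pvAstep PySem.Dict.empty).items
      = ((l.foldl pvBstep PySem.Dict.empty).items).map (fun pr =>
          (pr.1, [(PySem.List.max? ((0 : Int) :: pr.2.map (fun s => s.1)) (fun y => y)).getD 0,
                  (PySem.List.max? ((0 : Int) :: pr.2.map (fun s => s.2)) (fun y => y)).getD 0])) := by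
  have hkA : (l.foldl pvAstep (PySem.Dict.empty : PySem.Dict String (List Int))).keys
      = PySem.Set.update [] (l.map (fun e => e.1)) := by
    rw [pvAstep_funext]
    exact PySem.Dict.keys_foldl_insert_key l (fun e => e.1) _ _
  have hkB : (l.foldl pvBstep (PySem.Dict.empty : PySem.Dict String (List (Int × Int)))).keys
      = PySem.Set.update [] (l.map (fun e => e.1)) := by
    have := PySem.Dict.keys_foldl_modify_key l (fun e => e.1) ([] : List (Int × Int))
      (fun _ e l => l ++ [e.2]) PySem.Dict.empty
    exact this
  have hndA : (l.foldl pvAstep (PySem.Dict.empty : PySem.Dict String (List Int))).keys.Nodup := by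
    rw [pvAstep_funext]
    exact PySem.Dict.nodup_keys_foldl_insert_key l (fun e => e.1) _ _ (by simp)
  have hndB : (l.foldl pvBstep (PySem.Dict.empty : PySem.Dict String (List (Int × Int)))).keys.Nodup := by
    exact PySem.Dict.nodup_keys_foldl_modify_key l (fun e => e.1) _ (fun _ e l => l ++ [e.2]) _ (by simp)
  rw [PySem.Dict.items_eq_map_keys _ hndA ([0, 0] : List Int),
      PySem.Dict.items_eq_map_keys _ hndB ([] : List (Int × Int)),
      hkA, hkB, List.map_map]
  refine List.map_congr_left (fun k _ => ?_)
  have hB : (l.foldl pvBstep PySem.Dict.empty).getD k []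
      = (l.filter (fun e => e.1 == k)).map (fun e => e.2) := by
    have h := PySem.Dict.getD_foldl_modify_append l
      (PySem.Dict.empty : PySem.Dict String (List (Int × Int))) k
    simpa using h
  have hA := pvA_getD l k PySem.Dict.empty 0 0 (by simp)
  simp [hA, hB, PySem.List.max?_id_cons, Function.comp_def, List.map_map]

theorem pv_main (xs : List (String × Int × Int × List String)) :
    get_process_to_utilization_mapping xs = get_process_to_utilization_mapping_alt xs := by
  unfold get_process_to_utilization_mapping get_process_to_utilization_mapping_alt
  rw [pvA_events, pvB_events]
  exact pv_items (pvEvents xs)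

-- ===== VERDICT (by name: the statement is the Claim_ definition above) =====
theorem get_process_to_utilization_mapping_spec : Claim_equal_get_process_to_utilization_mapping := by
  intro xs _ _
  exact pv_main xs
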